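-- pv_equiv track=rewrite | github.com/Fronks0/GroznyQuiz | ratings/signals.py | calculate_places
-- ===== SOURCE A (Python) =====
-- def calculate_places(points_list):
--     if not points_list:
--         return []
--
--     places = []
--     current_place = 1
--
--     for i, points in enumerate(points_list):
--         if i == 0:
--             places.append(current_place)
--         elif points == points_list[i-1]:
--             places.append(current_place)
--         else:
--             current_place += 1
--             places.append(current_place)
--
--     return places
-- ===== SOURCE B (Python) =====
-- def calculate_places(points_list):
--     # phase 1: run-length encode the list into (value, count) runs
--     runs = []
--     for x in points_list:
--         if runs and runs[-1][0] == x: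
--             runs[-1] = (runs[-1][0], runs[-1][1] + 1)
--         else:
--             runs.append((x, 1))
--     # phase 2: expand run k (1-based) into count copies of its dense rank k
--     out = []
--     for rank, (_, cnt) in enumerate(runs, 1):
--         out += [rank] * cnt
--     return out
-- ===== Notes on version B (the rewrite author's own statement) =====
-- stated objective: alternative
-- what changed: Replaces A's per-element loop with a running current_place and an index peek at points_list[i-1] by a run-length-encoding pipeline: first compress the list into (value,count) runs, then expand run k into count copies of rank k.
import Mathlib
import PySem

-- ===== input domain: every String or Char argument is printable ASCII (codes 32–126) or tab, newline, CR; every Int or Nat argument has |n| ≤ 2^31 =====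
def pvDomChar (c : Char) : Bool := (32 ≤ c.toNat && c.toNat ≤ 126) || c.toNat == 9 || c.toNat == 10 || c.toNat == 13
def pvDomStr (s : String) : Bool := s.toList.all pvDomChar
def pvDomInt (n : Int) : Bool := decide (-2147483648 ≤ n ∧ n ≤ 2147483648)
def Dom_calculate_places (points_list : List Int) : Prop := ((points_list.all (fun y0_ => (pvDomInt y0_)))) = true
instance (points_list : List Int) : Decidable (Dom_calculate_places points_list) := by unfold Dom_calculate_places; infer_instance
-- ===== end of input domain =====

-- B replaces A's per-element loop (running current_place plus an index peek at
-- points_list[i-1]) by a run-length-encoding pipeline: compress into (value,count)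
-- runs, then expand run k into count copies of rank k; objective: alternative, same O(n).

-- ===== PORT A =====
-- loop body of A's for-loop; state = (places, current_place).
-- points_list[i-1] is only read when i ≥ 1, so the index is always in range; .getD 0 only
-- makes the expression total and is never the value used on an admitted input.
def pvStepA (points_list : List Int) (st : List Int × Int) (ip : Int × Int) : List Int × Int :=
  if ip.1 = 0 then (st.1 ++ [st.2], st.2)
  else if ip.2 == (PySem.List.pyGet? points_list (ip.1 - 1)).getD 0 then (st.1 ++ [st.2], st.2)
  else (st.1 ++ [st.2 + 1], st.2 + 1)

def calculate_places (points_list : List Int) : List Int :=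
  if points_list = [] then []
  else ((PySem.List.enumerate points_list 0).foldl (pvStepA points_list) ([], 1)).1

-- ===== PORT B =====
-- phase-1 loop body: 'if runs and runs[-1][0] == x: bump last count else append (x,1)'
def pvAddRun (runs : List (Int × Int)) (x : Int) : List (Int × Int) :=
  match runs.getLast? with
  | some (v, c) => if v == x then runs.dropLast ++ [(v, c + 1)] else runs ++ [(x, 1)]
  | none => [(x, 1)]

-- phase-2 loop body: 'out += [rank] * cnt' ([r] * c is empty for c < 0, hence .toNat)
def pvExpand (out : List Int) (rc : Int × (Int × Int)) : List Int :=
  out ++ List.replicate rc.2.2.toNat rc.1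

def calculate_places_alt (points_list : List Int) : List Int :=
  let runs := points_list.foldl pvAddRun []
  (PySem.List.enumerate runs 1).foldl pvExpand []

-- ===== PRECONDITION & SPEC =====
def Spec_calculate_places (points_list : List Int) (out : List Int) : Prop := out = calculate_places_alt points_list
instance (points_list : List Int) (out : List Int) : Decidable (Spec_calculate_places points_list out) := by unfold Spec_calculate_places; infer_instance

-- ===== CLAIM (what is proved, stated in full; the proofs are below) =====
def Claim_equal_calculate_places : Prop := ∀ (points_list : List Int), Dom_calculate_places points_list → Spec_calculate_places points_list (calculate_places points_list)

-- ===== LEMMAS AND PROOFS =====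

-- reference: dense ranks of the tail, given the previous element and current place
def pvRef (cp : Int) (prev : Int) : List Int → List Int
  | [] => []
  | y :: ys => if y = prev then cp :: pvRef cp y ys else (cp + 1) :: pvRef (cp + 1) y ys

-- reference run-length encoding of (prev repeated, count so far c) followed by ys
def pvRunsOf (prev : Int) (c : Int) : List Int → List (Int × Int)
  | [] => [(prev, c)]
  | y :: ys => if y = prev then pvRunsOf prev (c + 1) ys else (prev, c) :: pvRunsOf y 1 ys

lemma pvRunsOf_cons (prev c y : Int) (ys : List Int) :
    pvRunsOf prev c (y :: ys)
      = if y = prev then pvRunsOf prev (c + 1) ys else (prev, c) :: pvRunsOf y 1 ys := rfl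

-- A's loop over the tail (indices k+1, …), with L[k] = prev, yields acc ++ pvRef cp prev ys
lemma pvLoopA_eq (L : List Int) (ys : List Int) :
    ∀ (k : Nat) (prev : Int) (acc : List Int) (cp : Int),
      L[k]? = some prev → L.drop (k + 1) = ys →
      ((PySem.List.enumerate ys ((k : Int) + 1)).foldl (pvStepA L) (acc, cp)).1
        = acc ++ pvRef cp prev ys := by
  induction ys with
  | nil => intro k prev acc cp _ _; simp [PySem.List.enumerate_nil, pvRef]
  | cons y ys ih =>
    intro k prev acc cp hk hdrop
    have hk1 : L[k + 1]? = some y := by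
      have : (L.drop (k + 1))[0]? = some y := by rw [hdrop]; simp
      simpa using this
    have hdrop1 : L.drop (k + 1 + 1) = ys := by
      have : List.drop 1 (L.drop (k + 1)) = ys := by rw [hdrop]; simp
      simpa [List.drop_drop, Nat.add_comm] using this
    rw [PySem.List.enumerate_cons]
    simp only [List.foldl_cons]
    have hstep : pvStepA L (acc, cp) ((k : Int) + 1, y)
        = if y = prev then (acc ++ [cp], cp) else (acc ++ [cp + 1], cp + 1) := by
      unfold pvStepA
      have h0 : ¬ ((k : Int) + 1 = 0) := by omega
      have hidx : ((k : Int) + 1 - 1) = ((k : Nat) : Int) := by omega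
      by_cases hyp : y = prev <;> simp [h0, hidx, hk, hyp]
    rw [show ((k : Int) + 1 + 1) = (((k + 1 : Nat) : Int) + 1) by push_cast; ring]
    by_cases hyp : y = prev
    · rw [hstep]; simp only [hyp, if_true]
      rw [ih (k + 1) y (acc ++ [cp]) cp hk1 hdrop1]
      simp [pvRef, hyp, List.append_assoc]
    · rw [hstep]; simp only [hyp, if_false]
      rw [ih (k + 1) y (acc ++ [cp + 1]) (cp + 1) hk1 hdrop1]
      simp [pvRef, hyp, List.append_assoc]

-- B's phase-1 fold, once a last run (prev,c) exists, computes pvRunsOf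
lemma pvFoldRuns_eq (ys : List Int) :
    ∀ (rs : List (Int × Int)) (prev c : Int),
      List.foldl pvAddRun (rs ++ [(prev, c)]) ys = rs ++ pvRunsOf prev c ys := by
  induction ys with
  | nil => intro rs prev c; simp [pvRunsOf]
  | cons y ys ih =>
    intro rs prev c
    simp only [List.foldl_cons]
    have hadd : pvAddRun (rs ++ [(prev, c)]) y
        = if y = prev then rs ++ [(prev, c + 1)] else (rs ++ [(prev, c)]) ++ [(y, 1)] := by
      unfold pvAddRun
      rw [List.getLast?_concat]
      by_cases hyp : y = prev
      · simp [hyp]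
      · have h' : (prev == y) = false := by simp [Ne.symm hyp]
        simp [h', hyp]
    by_cases hyp : y = prev
    · rw [hadd]; simp only [hyp, if_true]
      rw [ih rs prev (c + 1)]
      simp [pvRunsOf]
    · rw [hadd]; simp only [hyp, if_false]
      rw [ih (rs ++ [(prev, c)]) y 1]
      simp [pvRunsOf, hyp, List.append_assoc]

-- B's phase-2 fold over the runs expands to replicate ++ pvRef
lemma pvExpandRuns_eq (ys : List Int) :
    ∀ (prev c r : Int) (acc : List Int), 0 ≤ c →
      (PySem.List.enumerate (pvRunsOf prev c ys) r).foldl pvExpand acc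
        = acc ++ List.replicate c.toNat r ++ pvRef r prev ys := by
  induction ys with
  | nil =>
    intro prev c r acc _
    simp [pvRunsOf, PySem.List.enumerate_cons, PySem.List.enumerate_nil, pvExpand, pvRef]
  | cons y ys ih =>
    intro prev c r acc hc
    by_cases hyp : y = prev
    · have h1 : pvRunsOf prev c (y :: ys) = pvRunsOf prev (c + 1) ys := by
        rw [pvRunsOf_cons, if_pos hyp]
      rw [h1, ih prev (c + 1) r acc (by omega)]
      have hrep : (c + 1).toNat = c.toNat + 1 := by omega
      simp [pvRef, hyp, hrep, List.replicate_succ', List.append_assoc]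
    · have h1 : pvRunsOf prev c (y :: ys) = (prev, c) :: pvRunsOf y 1 ys := by
        rw [pvRunsOf_cons, if_neg hyp]
      rw [h1, PySem.List.enumerate_cons]
      simp only [List.foldl_cons]
      have : pvExpand acc (r, (prev, c)) = acc ++ List.replicate c.toNat r := rfl
      rw [this, ih y 1 (r + 1) _ (by omega)]
      simp [pvRef, hyp, List.append_assoc]

-- ===== VERDICT (by name: the statement is the Claim_ definition above) =====
theorem calculate_places_spec : Claim_equal_calculate_places := by
  intro points_list _
  unfold Spec_calculate_places calculate_places calculate_places_alt
  cases points_list with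
  | nil => simp [PySem.List.enumerate_nil]
  | cons x ys =>
    simp only [if_neg (List.cons_ne_nil x ys)]
    -- A side
    rw [PySem.List.enumerate_cons]
    simp only [List.foldl_cons]
    have hstep0 : pvStepA (x :: ys) ([], 1) (0, x) = ([1], 1) := by
      unfold pvStepA; simp
    rw [hstep0]
    have e : (0 : Int) + 1 = ((0 : Nat) : Int) + 1 := by norm_num
    rw [e, pvLoopA_eq (x :: ys) ys 0 x [1] 1 (by simp) (by simp)]
    -- B side
    show _ = (PySem.List.enumerate (List.foldl pvAddRun [] (x :: ys)) 1).foldl pvExpand []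
    simp only [List.foldl_cons]
    have hadd0 : pvAddRun [] x = [] ++ [(x, 1)] := by simp [pvAddRun]
    rw [hadd0, pvFoldRuns_eq ys [] x 1]
    rw [show ([] ++ pvRunsOf x 1 ys) = pvRunsOf x 1 ys by simp]
    rw [pvExpandRuns_eq ys x 1 1 [] (by norm_num)]
    norm_num [List.replicate]
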